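-- pv_equiv track=rewrite | github.com/nepenth/AI-Agents | KnowledgeBaseAgent/backend/app/services/auth_service.py | check_permission
-- ===== SOURCE A (Python) =====
-- from typing import Optional, Dict, Any, List
--
-- def check_permission(user_permissions: List[str], required_permission: str) -> bool:
--     """Check if user has required permission."""
--     # Admin role has all permissions
--     if "admin" in user_permissions:
--         return True
--
--     # Check exact permission match
--     if required_permission in user_permissions:
--         return True
--
--     # Check wildcard permissions
--     for permission in user_permissions:
--         if permission.endswith("*"):
--             prefix = permission[:-1]
--             if required_permission.startswith(prefix):
--                 return True
--
--     return False
-- ===== SOURCE B (Python) =====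
-- def check_permission(user_permissions, required_permission):
--     """Index the permissions in a set once, then answer by key lookups:
--     'admin', the exact permission, and required_permission truncated to each
--     stem length observed among wildcard permissions, extended with '*'.
--     Correct because a wildcard permission matching required_permission is
--     exactly required_permission[:len(stem)] + '*' for its own stem length."""
--     perms = set(user_permissions)
--     if "admin" in perms or required_permission in perms:
--         return True
--     lengths = {len(p) - 1 for p in perms if p.endswith("*")}
--     return any(required_permission[:i] + "*" in perms for i in lengths)
-- ===== Notes on version B (the rewrite author's own statement) =====
-- stated objective: alternative
-- what changed: B builds a set of the user's permissions once and answers by key lookups -- 'admin', the exact permission, and required_permission truncated to each stem length observed among wildcard permissions plus '*' -- instead of A's three sequential scans with per-element endswith/startswith tests.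
import Mathlib
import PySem

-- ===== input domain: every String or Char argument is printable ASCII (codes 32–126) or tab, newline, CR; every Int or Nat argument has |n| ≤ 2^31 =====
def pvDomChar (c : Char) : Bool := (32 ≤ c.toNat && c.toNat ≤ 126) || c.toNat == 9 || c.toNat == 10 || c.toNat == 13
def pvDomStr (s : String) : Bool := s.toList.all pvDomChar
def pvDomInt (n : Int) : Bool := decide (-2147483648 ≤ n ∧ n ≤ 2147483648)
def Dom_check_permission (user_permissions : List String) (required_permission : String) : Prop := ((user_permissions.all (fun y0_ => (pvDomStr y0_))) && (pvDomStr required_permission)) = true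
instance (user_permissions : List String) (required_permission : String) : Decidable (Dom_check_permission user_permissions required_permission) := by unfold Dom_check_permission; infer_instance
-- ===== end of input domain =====

-- B indexes user_permissions in a set once and looks up candidate keys
-- ("admin", the exact permission, each prefix of required_permission + "*")
-- instead of A's three scans over the list (objective: alternative).


-- ===== PORT A =====
-- A's wildcard loop: scan for a permission ending in "*" whose prefix starts required_permission.
def checkWildcardLoop (perms : List String) (required_permission : String) : Bool :=
  match perms with
  | [] => false
  | permission :: rest =>
    if PySem.Str.endswith permission "*" then
      let prefix_ := PySem.Str.slice permission none (some (-1))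
      if PySem.Str.startswith required_permission prefix_ then true
      else checkWildcardLoop rest required_permission
    else checkWildcardLoop rest required_permission

def check_permission (user_permissions : List String) (required_permission : String) : Bool :=
  if user_permissions.contains "admin" then true
  else if user_permissions.contains required_permission then true
  else checkWildcardLoop user_permissions required_permission

-- ===== PORT B =====
-- perms = set(user_permissions); membership probes for "admin", the exact
-- permission, and required_permission[:i] + "*" for each stem length i
-- observed among wildcard permissions.
def check_permission_alt (user_permissions : List String) (required_permission : String) : Bool :=
  let perms : PySem.Set String := PySem.Set.ofList user_permissions
  if PySem.Set.contains perms "admin" || PySem.Set.contains perms required_permission then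
    true
  else
    let lengths : PySem.Set Int :=
      PySem.Set.ofList ((perms.filter (fun p => PySem.Str.endswith p "*")).map
        (fun p => PySem.Str.len p - 1))
    lengths.any (fun i =>
      PySem.Set.contains perms
        (String.ofList (PySem.Chars.slice required_permission.toList none (some i) ++ ['*'])))

-- ===== PRECONDITION & SPEC =====
def Spec_check_permission (user_permissions : List String) (required_permission : String) (out : Bool) : Prop := out = check_permission_alt user_permissions required_permission
instance (user_permissions : List String) (required_permission : String) (out : Bool) : Decidable (Spec_check_permission user_permissions required_permission out) := by unfold Spec_check_permission; infer_instance

-- ===== CLAIM (what is proved, stated in full; the proofs are below) =====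
def Claim_equal_check_permission : Prop := ∀ (user_permissions : List String) (required_permission : String), Dom_check_permission user_permissions required_permission → Spec_check_permission user_permissions required_permission (check_permission user_permissions required_permission)

-- ===== LEMMAS AND PROOFS =====

-- A's wildcard loop is the any of its per-element test.
theorem checkWildcardLoop_eq_any (perms : List String) (rp : String) :
    checkWildcardLoop perms rp =
      perms.any (fun p => PySem.Str.endswith p "*" &&
        PySem.Str.startswith rp (PySem.Str.slice p none (some (-1)))) := by
  induction perms with
  | nil => rfl
  | cons p rest ih =>
    by_cases h1 : PySem.Chars.endswith p.toList ['*'] = true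
    · simp [checkWildcardLoop, h1, ih]
    · simp only [Bool.not_eq_true] at h1
      simp [checkWildcardLoop, h1, ih]

-- The heart of the equivalence: a permission ending in "*" whose stem starts
-- required_permission exists in the list iff, for some stem length i observed
-- among the wildcard permissions, required_permission truncated to i characters
-- and extended with "*" is itself a member of the list.
theorem wildcard_exists_iff (ups : List String) (rp : String) :
    (∃ p ∈ ups, PySem.Chars.endswith p.toList ['*'] = true ∧
        PySem.Chars.startswith rp.toList p.toList.dropLast = true) ↔
    (∃ i ∈ (ups.filter (fun p => PySem.Chars.endswith p.toList ['*'])).map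
        (fun p => (p.toList.length : Int) - 1),
        String.ofList (PySem.List.slice rp.toList none (some i) ++ ['*']) ∈ ups) := by
  constructor
  · rintro ⟨p, hp, he, hs⟩
    have he' := he
    rw [PySem.Chars.endswith_iff] at he'
    obtain ⟨q, hq⟩ := he'
    have hdl : p.toList.dropLast = q := by
      rw [← hq]; simp
    rw [hdl] at hs
    rw [PySem.Chars.startswith_iff] at hs
    refine ⟨(p.toList.length : Int) - 1, ?_, ?_⟩
    · exact List.mem_map.mpr ⟨p, List.mem_filter.mpr ⟨hp, he⟩, rfl⟩
    · have hlen : p.toList.length = q.length + 1 := by rw [← hq]; simp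
      have h0 : (0 : Int) ≤ (p.toList.length : Int) - 1 := by omega
      rw [PySem.List.slice_to _ h0]
      have hnat : ((p.toList.length : Int) - 1).toNat = q.length := by omega
      rw [hnat, ← List.prefix_iff_eq_take.mp hs]
      rw [show q ++ ['*'] = p.toList from hq, String.ofList_toList]
      exact hp
  · rintro ⟨i, hi, hmem⟩
    obtain ⟨p', hp', hip⟩ := List.mem_map.mp hi
    have he' : PySem.Chars.endswith p'.toList ['*'] = true := (List.mem_filter.mp hp').2
    rw [PySem.Chars.endswith_iff] at he'
    have h0 : (0 : Int) ≤ i := by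
      rw [← hip]
      have h1 := he'.length_le
      simp only [List.length_singleton] at h1
      simp only [sub_nonneg]
      exact_mod_cast h1
    refine ⟨_, hmem, ?_, ?_⟩
    · rw [PySem.Chars.endswith_iff]
      simp [String.toList_ofList]
    · rw [PySem.Chars.startswith_iff]
      simp only [String.toList_ofList, List.dropLast_concat]
      rw [PySem.List.slice_to _ h0]
      exact List.take_prefix _ _

theorem check_permission_eq (ups : List String) (rp : String) :
    check_permission ups rp = check_permission_alt ups rp := by
  have hc : ∀ x : String, PySem.Set.contains (PySem.Set.ofList ups) x = true ↔ x ∈ ups := by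
    intro x
    simp [PySem.Set.contains, PySem.Set.mem_ofList]
  have hA : check_permission ups rp = true ↔
      ("admin" ∈ ups ∨ rp ∈ ups ∨ ∃ p ∈ ups,
        PySem.Chars.endswith p.toList ['*'] = true ∧
        PySem.Chars.startswith rp.toList p.toList.dropLast = true) := by
    simp only [check_permission, checkWildcardLoop_eq_any]
    split_ifs with h1 h2 <;>
      simp_all [List.any_eq_true, PySem.Str.endswith_eq, PySem.Str.startswith_eq,
        PySem.List.slice_to_neg_one]
  have hB : check_permission_alt ups rp = true ↔
      ("admin" ∈ ups ∨ rp ∈ ups ∨ ∃ i ∈ (ups.filter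
          (fun p => PySem.Chars.endswith p.toList ['*'])).map
          (fun p => (p.toList.length : Int) - 1),
        String.ofList (PySem.List.slice rp.toList none (some i) ++ ['*']) ∈ ups) := by
    simp only [check_permission_alt]
    split_ifs with h1
    · rw [Bool.or_eq_true, hc, hc] at h1
      simp only [true_iff]
      tauto
    · rw [Bool.or_eq_true, hc, hc] at h1
      rw [not_or] at h1
      simp only [h1.1, h1.2, false_or, List.any_eq_true]
      constructor
      · rintro ⟨i, hi, hm⟩
        rw [hc] at hm
        rw [PySem.Set.mem_ofList] at hi
        obtain ⟨p', hp', hip⟩ := List.mem_map.mp hi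
        have hp'' : p' ∈ ups := PySem.Set.mem_ofList ups p' |>.mp (List.mem_filter.mp hp').1
        refine ⟨i, List.mem_map.mpr ⟨p', List.mem_filter.mpr ⟨hp'', ?_⟩, ?_⟩, ?_⟩
        · have := (List.mem_filter.mp hp').2
          simpa [PySem.Str.endswith_eq] using this
        · simpa [PySem.Str.len_eq] using hip
        · simpa [PySem.Chars.slice_eq_listSlice] using hm
      · rintro ⟨i, hi, hm⟩
        obtain ⟨p', hp', hip⟩ := List.mem_map.mp hi
        have hf := List.mem_filter.mp hp'
        refine ⟨i, ?_, ?_⟩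
        · rw [PySem.Set.mem_ofList]
          refine List.mem_map.mpr ⟨p', List.mem_filter.mpr
            ⟨(PySem.Set.mem_ofList ups p').mpr hf.1, ?_⟩, ?_⟩
          · simpa [PySem.Str.endswith_eq] using hf.2
          · simpa [PySem.Str.len_eq] using hip
        · rw [hc]
          simpa [PySem.Chars.slice_eq_listSlice] using hm
  rw [Bool.eq_iff_iff, hA, hB]
  exact or_congr_right (or_congr_right (wildcard_exists_iff ups rp))

-- ===== VERDICT (by name: the statement is the Claim_ definition above) =====
theorem check_permission_spec : Claim_equal_check_permission := by
  intro ups rp _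
  unfold Spec_check_permission
  exact check_permission_eq ups rp
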